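-- pv_equiv track=rewrite | github.com/pypi-data/pypi-mirror-401 | packages/codestory-cli/codestory_cli-0.1.12.tar.gz/codestory_cli-0.1.12/src/codestory/core/semantic_analysis/annotation/utils.py | truncate_patch
-- ===== SOURCE A (Python) =====
-- def truncate_patch(
--     patch: str,
--     max_length: int = 200,
--     truncate_line: str = "[TRUNCATED: remaining patch omitted]",
-- ) -> str:
--     """Truncates a patch string to a maximum length."""
--     if len(patch) <= max_length:
--         return patch
--
--     lines = patch.splitlines()
--     sum_length = 0
--     i = 0
--
--     while sum_length < (max_length - len(truncate_line)) and i < len(lines):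
--         sum_length += len(lines[i]) + 1  # +1 for the newline character
--         i += 1
--
--     return "\n".join(lines[:i] + [truncate_line]) if i < len(lines) else patch
-- ===== SOURCE B (Python) =====
-- def truncate_patch(
--     patch: str,
--     max_length: int = 200,
--     truncate_line: str = "[TRUNCATED: remaining patch omitted]",
-- ) -> str:
--     """Truncates a patch string to a maximum length (prefix table + binary search)."""
--     if len(patch) <= max_length:
--         return patch
--
--     lines = patch.splitlines()
--     # prefix[k] = characters consumed by the first k lines (each line + its newline)
--     prefix = [0]
--     total = 0
--     for l in lines:
--         total += len(l) + 1
--         prefix.append(total)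
--
--     threshold = max_length - len(truncate_line)
--     # binary search: smallest i in [0, len(lines)] with prefix[i] >= threshold
--     lo, hi = 0, len(lines)
--     while lo < hi:
--         mid = (lo + hi) // 2
--         if prefix[mid] < threshold:
--             lo = mid + 1
--         else:
--             hi = mid
--
--     if lo < len(lines):
--         return "\n".join(lines[:lo] + [truncate_line])
--     return patch
-- ===== Notes on version B (the rewrite author's own statement) =====
-- stated objective: alternative
-- what changed: Replaces the stateful while-loop scan with a cumulative-length prefix table and a binary search for the cut index (smallest i with prefix[i] >= max_length - len(truncate_line), capped at len(lines)).
import Mathlib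
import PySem

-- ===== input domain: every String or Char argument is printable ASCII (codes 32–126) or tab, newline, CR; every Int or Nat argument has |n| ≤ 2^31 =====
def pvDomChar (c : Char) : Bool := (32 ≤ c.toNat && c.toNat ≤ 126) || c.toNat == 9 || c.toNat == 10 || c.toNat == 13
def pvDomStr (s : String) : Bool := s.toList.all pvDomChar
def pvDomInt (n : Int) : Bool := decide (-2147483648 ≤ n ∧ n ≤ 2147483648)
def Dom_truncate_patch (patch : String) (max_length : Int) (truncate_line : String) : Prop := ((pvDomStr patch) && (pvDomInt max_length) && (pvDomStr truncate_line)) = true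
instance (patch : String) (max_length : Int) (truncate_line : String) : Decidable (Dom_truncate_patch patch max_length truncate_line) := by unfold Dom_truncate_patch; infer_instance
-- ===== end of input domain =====

-- B replaces A's stateful while-loop scan by a cumulative-length prefix table plus a binary
-- search for the cut index (alternative decomposition, same asymptotic cost).

-- ===== PORT A =====
-- the while loop: while sum_length < th and i < len(lines): sum_length += len(lines[i]) + 1; i += 1
def truncate_patch_loop (lines : List String) (th : Int) (sum : Int) (i : Nat) : Nat :=
  if h : sum < th ∧ i < lines.length then
    truncate_patch_loop lines th (sum + PySem.Str.len lines[i] + 1) (i + 1)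
  else i
termination_by lines.length - i
decreasing_by omega

def truncate_patch (patch : String) (max_length : Int) (truncate_line : String) : String :=
  if PySem.Str.len patch ≤ max_length then patch
  else
    let lines := PySem.Str.splitlines patch
    let i := truncate_patch_loop lines (max_length - PySem.Str.len truncate_line) 0 0
    -- lines[:i] with i a nonnegative in-range index is List.take
    if i < lines.length then PySem.Str.join "\n" (lines.take i ++ [truncate_line]) else patch

-- ===== PORT B =====
-- prefix table built with a running total: for l in lines: total += len(l)+1; prefix.append(total)
def tpAltPrefix (lines : List String) (total : Int) : List Int :=
  match lines with
  | [] => []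
  | l :: rest => (total + PySem.Str.len l + 1) :: tpAltPrefix rest (total + PySem.Str.len l + 1)

-- binary search: while lo < hi: mid = (lo+hi)//2; if prefix[mid] < th: lo = mid+1 else hi = mid
-- (prefix[mid] is always in range in Source B; getD transcribes that plain indexing)
def tpAltBsearch (pre : List Int) (th : Int) (lo hi : Nat) : Nat :=
  if h : lo < hi then
    if pre.getD ((lo + hi) / 2) 0 < th then tpAltBsearch pre th ((lo + hi) / 2 + 1) hi
    else tpAltBsearch pre th lo ((lo + hi) / 2)
  else lo
termination_by hi - lo
decreasing_by all_goals omega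

def truncate_patch_alt (patch : String) (max_length : Int) (truncate_line : String) : String :=
  if PySem.Str.len patch ≤ max_length then patch
  else
    let lines := PySem.Str.splitlines patch
    let pre := 0 :: tpAltPrefix lines 0
    let i := tpAltBsearch pre (max_length - PySem.Str.len truncate_line) 0 lines.length
    if i < lines.length then PySem.Str.join "\n" (lines.take i ++ [truncate_line]) else patch

-- ===== PRECONDITION & SPEC =====
def Spec_truncate_patch (patch : String) (max_length : Int) (truncate_line : String) (out : String) : Prop := out = truncate_patch_alt patch max_length truncate_line
instance (patch : String) (max_length : Int) (truncate_line : String) (out : String) : Decidable (Spec_truncate_patch patch max_length truncate_line out) := by unfold Spec_truncate_patch; infer_instance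

-- ===== CLAIM (what is proved, stated in full; the proofs are below) =====
def Claim_equal_truncate_patch : Prop := ∀ (patch : String) (max_length : Int) (truncate_line : String), Dom_truncate_patch patch max_length truncate_line → Spec_truncate_patch patch max_length truncate_line (truncate_patch patch max_length truncate_line)

-- ===== LEMMAS AND PROOFS =====

-- tpG lines k = characters consumed by the first k lines (line length + 1 each)
def tpG (lines : List String) (k : Nat) : Int :=
  ((lines.take k).map (fun l => PySem.Str.len l + 1)).sum

theorem tpLen_nonneg (s : String) : 0 ≤ PySem.Str.len s := by
  simp [PySem.Str.len_eq]

theorem tpG_zero (lines : List String) : tpG lines 0 = 0 := by simp [tpG]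

theorem tpG_succ (lines : List String) (k : Nat) (h : k < lines.length) :
    tpG lines (k + 1) = tpG lines k + PySem.Str.len lines[k] + 1 := by
  simp only [tpG, List.take_add_one, List.getElem?_eq_getElem h, Option.toList_some,
    List.map_append, List.sum_append, List.map_cons, List.map_nil, List.sum_cons, List.sum_nil]
  ring

theorem tpG_cons (l : String) (rest : List String) (k : Nat) :
    tpG (l :: rest) (k + 1) = PySem.Str.len l + 1 + tpG rest k := by
  simp [tpG, List.take_succ_cons]

theorem tpG_mono (lines : List String) {j k : Nat} (hjk : j ≤ k) :
    tpG lines j ≤ tpG lines k := by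
  induction k with
  | zero =>
    have : j = 0 := by omega
    simp [this]
  | succ k ih =>
    rcases Nat.lt_or_ge j (k + 1) with hj | hj
    · have h1 : tpG lines j ≤ tpG lines k := ih (by omega)
      by_cases hk : k < lines.length
      · have := tpG_succ lines k hk
        have := tpLen_nonneg lines[k]
        omega
      · have : lines.take (k + 1) = lines.take k := by
          rw [List.take_of_length_le (by omega), List.take_of_length_le (by omega)]
        simpa [tpG, this] using h1
    · have : j = k + 1 := by omega
      simp [this]

theorem tpPrefix_getD (lines : List String) :
    ∀ (k : Nat) (total : Int), k < lines.length →
      (tpAltPrefix lines total).getD k 0 = total + tpG lines (k + 1) := by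
  induction lines with
  | nil => intro k total h; simp at h
  | cons l rest ih =>
    intro k total h
    cases k with
    | zero => simp [tpAltPrefix, tpG_cons, tpG_zero]; ring
    | succ k =>
      simp only [tpAltPrefix, List.getD_cons_succ]
      rw [ih k _ (by simpa using h), tpG_cons]
      ring

theorem tpPre_getD (lines : List String) (k : Nat) (hk : k ≤ lines.length) :
    (0 :: tpAltPrefix lines 0).getD k 0 = tpG lines k := by
  cases k with
  | zero => simp [tpG_zero]
  | succ k =>
    simp only [List.getD_cons_succ]
    rw [tpPrefix_getD lines k 0 (by omega)]
    ring

-- the characterization both cut indices satisfy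
def tpOk (lines : List String) (th : Int) (r : Nat) : Prop :=
  r ≤ lines.length ∧ (∀ j < r, tpG lines j < th) ∧ (r < lines.length → th ≤ tpG lines r)

theorem tpOk_unique (lines : List String) (th : Int) {r1 r2 : Nat}
    (h1 : tpOk lines th r1) (h2 : tpOk lines th r2) : r1 = r2 := by
  by_contra hne
  have hn1 := h1.1
  have hn2 := h2.1
  rcases Nat.lt_or_ge r1 r2 with h | h
  · have ha := h2.2.1 r1 h
    have hb := h1.2.2 (by omega)
    omega
  · have h' : r2 < r1 := by omega
    have ha := h1.2.1 r2 h'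
    have hb := h2.2.2 (by omega)
    omega

theorem tpLoop_char (lines : List String) (th : Int) :
    ∀ (fuel i : Nat), lines.length - i ≤ fuel → i ≤ lines.length →
      (∀ j < i, tpG lines j < th) →
      tpOk lines th (truncate_patch_loop lines th (tpG lines i) i) := by
  intro fuel
  induction fuel with
  | zero =>
    intro i hf hi hinv
    have hi' : i = lines.length := by omega
    subst hi'
    rw [truncate_patch_loop, dif_neg (by simp)]
    exact ⟨le_refl _, hinv, by omega⟩
  | succ fuel ih =>
    intro i hf hi hinv
    rw [truncate_patch_loop]
    by_cases h : tpG lines i < th ∧ i < lines.length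
    · rw [dif_pos h]
      have hsum : tpG lines i + PySem.Str.len lines[i] + 1 = tpG lines (i + 1) :=
        (tpG_succ lines i h.2).symm
      rw [hsum]
      exact ih (i + 1) (by omega) (by omega)
        (by intro j hj
            rcases Nat.lt_or_ge j i with hj' | hj'
            · exact hinv j hj'
            · have : j = i := by omega
              simpa [this] using h.1)
    · rw [dif_neg h]
      refine ⟨hi, hinv, ?_⟩
      intro hlt
      by_contra hc
      exact h ⟨by omega, hlt⟩

theorem tpBsearch_char (lines : List String) (th : Int) :
    ∀ (fuel lo hi : Nat), hi - lo ≤ fuel → lo ≤ hi → hi ≤ lines.length →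
      (∀ j < lo, tpG lines j < th) →
      (hi < lines.length → th ≤ tpG lines hi) →
      tpOk lines th (tpAltBsearch (0 :: tpAltPrefix lines 0) th lo hi) := by
  intro fuel
  induction fuel with
  | zero =>
    intro lo hi hf hlh hhn hlow hhigh
    have : lo = hi := by omega
    rw [tpAltBsearch, dif_neg (by omega)]
    exact ⟨by omega, hlow, by subst this; exact hhigh⟩
  | succ fuel ih =>
    intro lo hi hf hlh hhn hlow hhigh
    rw [tpAltBsearch]
    by_cases h : lo < hi
    · rw [dif_pos h]
      have hmid1 : lo ≤ (lo + hi) / 2 := by omega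
      have hmid2 : (lo + hi) / 2 < hi := by omega
      rw [tpPre_getD lines ((lo + hi) / 2) (by omega)]
      by_cases hc : tpG lines ((lo + hi) / 2) < th
      · rw [if_pos hc]
        exact ih ((lo + hi) / 2 + 1) hi (by omega) (by omega) hhn
          (by intro j hj
              have : tpG lines j ≤ tpG lines ((lo + hi) / 2) := tpG_mono lines (by omega)
              omega) hhigh
      · rw [if_neg hc]
        exact ih lo ((lo + hi) / 2) (by omega) (by omega) (by omega) hlow
          (by intro _; omega)
    · rw [dif_neg h]
      have : lo = hi := by omega
      exact ⟨by omega, hlow, by subst this; exact hhigh⟩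

-- ===== VERDICT (by name: the statement is the Claim_ definition above) =====
theorem truncate_patch_spec : Claim_equal_truncate_patch := by
  intro patch max_length truncate_line _
  unfold Spec_truncate_patch truncate_patch truncate_patch_alt
  set lines := PySem.Str.splitlines patch with hlines
  set th := max_length - PySem.Str.len truncate_line with hth
  have hA : tpOk lines th (truncate_patch_loop lines th 0 0) := by
    have := tpLoop_char lines th lines.length 0 (by omega) (by omega) (by omega)
    simpa [tpG_zero] using this
  have hB : tpOk lines th (tpAltBsearch (0 :: tpAltPrefix lines 0) th 0 lines.length) := by
    exact tpBsearch_char lines th lines.length 0 lines.length (by omega) (by omega)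
      (by omega) (by omega) (by omega)
  simp only [tpOk_unique lines th hA hB]
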